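-- pv_equiv track=rewrite | github.com/ViniciusGGT/mousekey | __init__.py | log_split
-- ===== SOURCE A (Python) =====
-- import itertools
--
-- def log_split(*args):
--     """Split an iterable into logarithmically growing chunks.
--
--     Each successive chunk contains one more element than the previous.
--     If multiple iterables are given, they are zipped together first.
--
--     Args:
--         *args: One or more iterables to split.
--
--     Yields:
--         list: Successive chunks of increasing size.
--     """
--     def logsplit(lst):
--         iterator = iter(lst)
--         for n, e in enumerate(iterator):
--             yield itertools.chain([e], itertools.islice(iterator, n))
--
--     if len(args) > 1:
--         for x in logsplit(zip(*args)):
--             yield list(x)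
--     else:
--         for x in logsplit(args[0]):
--             yield list(x)
-- ===== SOURCE B (Python) =====
-- def log_split(*args):
--     """Split an iterable into logarithmically growing chunks.
--
--     Simpler accumulator loop: resolve the source once, then collect
--     elements into a current chunk whose target size grows 1,2,3,...;
--     flush the trailing partial chunk at the end.
--     """
--     source = zip(*args) if len(args) > 1 else args[0]
--     chunk = []
--     target = 1
--     for e in source:
--         chunk.append(e)
--         if len(chunk) == target:
--             yield chunk
--             target += 1
--             chunk = []
--     if chunk:
--         yield chunk
-- ===== Notes on version B (the rewrite author's own statement) =====
-- stated objective: simpler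
-- what changed: Replaces the enumerate+chain+islice shared-iterator trick with a plain accumulator loop that appends elements to a current chunk and flushes it each time it reaches a target size growing 1,2,3,...
import Mathlib
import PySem

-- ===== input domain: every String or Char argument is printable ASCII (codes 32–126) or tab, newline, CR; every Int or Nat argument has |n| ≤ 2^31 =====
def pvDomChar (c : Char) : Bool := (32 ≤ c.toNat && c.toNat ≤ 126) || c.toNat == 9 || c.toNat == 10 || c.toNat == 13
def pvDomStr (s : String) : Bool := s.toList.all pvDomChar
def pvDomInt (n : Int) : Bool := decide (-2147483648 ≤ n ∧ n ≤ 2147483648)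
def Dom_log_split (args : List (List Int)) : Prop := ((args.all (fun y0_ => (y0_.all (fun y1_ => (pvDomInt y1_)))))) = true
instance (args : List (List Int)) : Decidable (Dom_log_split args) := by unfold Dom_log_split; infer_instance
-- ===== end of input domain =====

-- B replaces A's enumerate+chain+islice shared-iterator trick with a plain
-- accumulator loop (current chunk + growing target size); objective: simpler.


-- ===== PORT A =====
-- A's inner generator: chunk n (0-based) is the current element plus the next n
-- elements pulled from the same iterator (islice), i.e. take (n+1) / drop (n+1).
def logsplitA (lst : List (List Int)) (n : Nat) : List (List (List Int)) :=
  match lst with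
  | [] => []
  | e :: rest => (e :: rest.take n) :: logsplitA (rest.drop n) (n + 1)
termination_by lst.length
decreasing_by simp [List.length_drop]

-- under the type convention args is the one iterable argument, so A runs the
-- len(args)==1 branch: logsplit over it directly.
def log_split (args : List (List Int)) : List (List (List Int)) :=
  logsplitA args 0

-- ===== PORT B =====
-- B: accumulator loop — append each element to the current chunk, flush when it
-- reaches the target size (growing 1,2,3,...), flush the trailing partial chunk.
def accChunks (src : List (List Int)) (chunk : List (List Int)) (target : Nat) :
    List (List (List Int)) :=
  match src with
  | [] => if chunk.isEmpty then [] else [chunk]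
  | e :: rest =>
    let c := chunk ++ [e]
    if c.length = target then c :: accChunks rest [] (target + 1)
    else accChunks rest c target

def log_split_alt (args : List (List Int)) : List (List (List Int)) :=
  accChunks args [] 1

-- ===== PRECONDITION & SPEC =====
def Spec_log_split (args : List (List Int)) (out : List (List (List Int))) : Prop := out = log_split_alt args
instance (args : List (List Int)) (out : List (List (List Int))) : Decidable (Spec_log_split args out) := by unfold Spec_log_split; infer_instance

-- ===== CLAIM (what is proved, stated in full; the proofs are below) =====
def Claim_equal_log_split : Prop := ∀ (args : List (List Int)), Dom_log_split args → Spec_log_split args (log_split args)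

-- ===== LEMMAS AND PROOFS =====

@[simp] lemma logsplitA_nil (n : Nat) : logsplitA [] n = [] := by
  rw [logsplitA.eq_def]

lemma logsplitA_cons (e : List Int) (rest : List (List Int)) (n : Nat) :
    logsplitA (e :: rest) n = (e :: rest.take n) :: logsplitA (rest.drop n) (n + 1) := by
  rw [logsplitA.eq_def]

-- one step of B's loop, stated for an arbitrary partial chunk: with target
-- chunk.length + m (m ≥ 1) it emits chunk ++ take m and restarts empty.
lemma accChunks_step (lst : List (List Int)) :
    ∀ (chunk : List (List Int)) (m : Nat), 1 ≤ m →
    accChunks lst chunk (chunk.length + m) =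
      if lst.length < m then (if (chunk ++ lst).isEmpty then [] else [chunk ++ lst])
      else (chunk ++ lst.take m) :: accChunks (lst.drop m) [] (chunk.length + m + 1) := by
  induction lst with
  | nil =>
    intro chunk m hm
    simp [accChunks]
    intro h; omega
  | cons e rest ih =>
    intro chunk m hm
    rcases Nat.lt_or_ge 1 m with h2 | h1
    · -- m ≥ 2: chunk grows, target unchanged
      have hne : ¬ ((chunk ++ [e]).length = chunk.length + m) := by
        simp; omega
      have : accChunks (e :: rest) chunk (chunk.length + m)
          = accChunks rest (chunk ++ [e]) (chunk.length + m) := by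
        simp only [accChunks, hne]
        simp
      rw [this]
      have harr : chunk.length + m = (chunk ++ [e]).length + (m - 1) := by
        simp; omega
      rw [harr, ih (chunk ++ [e]) (m - 1) (by omega)]
      have hlen : (rest.length < m - 1) ↔ ((e :: rest).length < m) := by
        simp; omega
      by_cases hc : rest.length < m - 1
      · rw [if_pos hc, if_pos (hlen.mp hc)]
        simp
      · rw [if_neg hc, if_neg (fun h => hc (by simp at h ⊢; omega))]
        have htake : chunk ++ (e :: rest).take m = (chunk ++ [e]) ++ rest.take (m - 1) := by
          cases m with
          | zero => omega
          | succ k => simp [List.take_succ_cons]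
        have hdrop : (e :: rest).drop m = rest.drop (m - 1) := by
          cases m with
          | zero => omega
          | succ k => simp [List.drop_succ_cons]
        have htgt : (chunk ++ [e]).length + (m - 1) + 1 = chunk.length + m + 1 := by
          simp; omega
        rw [htake, hdrop, htgt]
    · -- m = 1: the chunk is flushed now
      have hm1 : m = 1 := by omega
      subst hm1
      have heq : (chunk ++ [e]).length = chunk.length + 1 := by simp
      have : accChunks (e :: rest) chunk (chunk.length + 1)
          = (chunk ++ [e]) :: accChunks rest [] (chunk.length + 1 + 1) := by
        simp only [accChunks, heq, if_pos]
      rw [this]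
      have hnl : ¬ ((e :: rest).length < 1) := by simp
      rw [if_neg hnl]
      simp

-- A's generator equals B's loop started with an empty chunk and target n+1
lemma logsplitA_eq_accChunks :
    ∀ (N : Nat) (lst : List (List Int)), lst.length ≤ N →
    ∀ (n : Nat), logsplitA lst n = accChunks lst [] (n + 1) := by
  intro N
  induction N with
  | zero =>
    intro lst hlen n
    have : lst = [] := List.eq_nil_of_length_eq_zero (by omega)
    subst this
    simp [accChunks]
  | succ N ih =>
    intro lst hlen n
    cases lst with
    | nil => simp [accChunks]
    | cons e rest =>
      have hstep := accChunks_step (e :: rest) [] (n + 1) (by omega)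
      simp only [List.length_nil, Nat.zero_add, List.nil_append] at hstep
      rw [hstep]
      by_cases hs : (e :: rest).length < n + 1
      · -- short trailing chunk: everything left forms the last chunk
        rw [if_pos hs]
        have hr : rest.length ≤ n := by simp at hs; omega
        have htake : rest.take n = rest := List.take_of_length_le hr
        have hdrop : rest.drop n = [] := List.drop_of_length_le hr
        rw [logsplitA_cons, htake, hdrop]
        simp
      · rw [if_neg hs]
        have htake : (e :: rest).take (n + 1) = e :: rest.take n := by
          simp [List.take_succ_cons]
        have hdrop : (e :: rest).drop (n + 1) = rest.drop n := by
          simp [List.drop_succ_cons]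
        rw [htake, hdrop]
        have hrec : logsplitA (rest.drop n) (n + 1) = accChunks (rest.drop n) [] (n + 1 + 1) :=
          ih (rest.drop n) (by simp at hlen ⊢; omega) (n + 1)
        rw [logsplitA_cons, hrec]

-- ===== VERDICT (by name: the statement is the Claim_ definition above) =====
theorem log_split_spec : Claim_equal_log_split := by
  intro args _
  unfold Spec_log_split log_split log_split_alt
  exact logsplitA_eq_accChunks args.length args le_rfl 0
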